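-- pv_equiv track=rewrite | github.com/pm4py/pm4py-core | pm4py/algo/simulation/playout/process_tree/variants/extensive.py | get_sequential_compositions_children
-- ===== SOURCE A (Python) =====
-- def get_min_remaining_length(traces):
--     """
--     Minimum remaining length (for sequential, parallel cut detection)
--
--     Parameters
--     --------------
--     traces
--         Traces
--     """
--     min_len_traces = []
--     min_rem_length = []
--     for x in traces:
--         if len(x) == 0:
--             min_len_traces.append(0)
--         else:
--             min_len_traces.append(len(x[0]))
--         min_rem_length.append(0)
--     min_rem_length[-1] = 0
--     min_rem_length[-2] = min_len_traces[-1]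
--     j = len(traces) - 3
--     while j >= 0:
--         min_rem_length[j] = min_rem_length[j + 1] + min_len_traces[j + 1]
--         j = j - 1
--     return min_len_traces, min_rem_length
--
-- def get_max_remaining_length(traces):
--     """
--     Maximum remaining length (for sequential, parallel cut detection)
--
--     Parameters
--     --------------
--     traces
--         Traces
--     """
--     max_len_traces = []
--     max_rem_length = []
--     for x in traces:
--         if len(x) == 0:
--             max_len_traces.append(0)
--         else:
--             max_len_traces.append(len(x[-1]))
--         max_rem_length.append(0)
--     max_rem_length[-1] = 0
--     max_rem_length[-2] = max_len_traces[-1]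
--     j = len(traces) - 3
--     while j >= 0:
--         max_rem_length[j] = max_rem_length[j + 1] + max_len_traces[j + 1]
--         j = j - 1
--     return max_len_traces, max_rem_length
--
-- def get_sequential_compositions_children(traces, min_trace_length, max_trace_length, mr, mar, max_limit_num_traces):
--     """
--     Returns alls the possible sequential combinations between
--     the children of a tree
--     """
--     diff = max_trace_length - mr
--     diff2 = min_trace_length - mar
--     min_len_traces, min_rem_length = get_min_remaining_length(traces)
--     max_len_traces, max_rem_length = get_max_remaining_length(traces)
--     curr = list(traces[0])
--     i = 1
--     while i < len(traces):
--         mrl = min_rem_length[i]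
--         marl = max_rem_length[i]
--         to_visit = []
--         j = 0
--         while j < len(curr):
--             x = curr[j]
--             if not type(x) is list:
--                 x = [x]
--             z = 0
--             while z < len(traces[i]):
--                 y = traces[i][z]
--                 xy = list(x)
--                 xy.append(y)
--                 val = sum(len(k) for k in xy)
--                 if val + mrl <= diff and val + marl >= diff2:
--                     to_visit.append(xy)
--                 z = z + 1
--             j = j + 1
--         curr = to_visit
--         i = i + 1
--     return curr
-- ===== SOURCE B (Python) =====
-- def _suffix_bounds(traces):
--     """min_rem[i] / max_rem[i]: summed shortest / longest child-trace lengths of the children after i."""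
--     if len(traces) <= 1:
--         return [0] * len(traces), [0] * len(traces)
--     t = traces[1]
--     lo = len(t[0]) if t else 0
--     hi = len(t[-1]) if t else 0
--     mn, mx = _suffix_bounds(traces[1:])
--     return [mn[0] + lo] + mn, [mx[0] + hi] + mx
--
--
-- def get_sequential_compositions_children(traces, min_trace_length, max_trace_length, mr, mar, max_limit_num_traces):
--     diff = max_trace_length - mr
--     diff2 = min_trace_length - mar
--     min_rem, max_rem = _suffix_bounds(traces)
--     # carry the running total length with each partial composition: O(1) per candidate
--     curr = [([s], len(s)) for s in traces[0]]
--     for i in range(1, len(traces)):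
--         mrl, marl = min_rem[i], max_rem[i]
--         nxt = []
--         for x, lx in curr:
--             for y in traces[i]:
--                 val = lx + len(y)
--                 if val + mrl <= diff and val + marl >= diff2:
--                     nxt.append((x + [y], val))
--         curr = nxt
--     return [x for x, _ in curr]
-- ===== Notes on version B (the rewrite author's own statement) =====
-- stated objective: alternative
-- what changed: B carries the running total length with each partial composition (adding one element's length per candidate instead of A re-summing the whole prefix) and computes both suffix remaining-length tables by one structural recursion instead of A's two build-then-patch index loops.
-- outside the precondition, e.g. on get_sequential_compositions_children([['a']], 1, 5, 0, 0, 10): A raises IndexError, B returns [['a']]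
import Mathlib
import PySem

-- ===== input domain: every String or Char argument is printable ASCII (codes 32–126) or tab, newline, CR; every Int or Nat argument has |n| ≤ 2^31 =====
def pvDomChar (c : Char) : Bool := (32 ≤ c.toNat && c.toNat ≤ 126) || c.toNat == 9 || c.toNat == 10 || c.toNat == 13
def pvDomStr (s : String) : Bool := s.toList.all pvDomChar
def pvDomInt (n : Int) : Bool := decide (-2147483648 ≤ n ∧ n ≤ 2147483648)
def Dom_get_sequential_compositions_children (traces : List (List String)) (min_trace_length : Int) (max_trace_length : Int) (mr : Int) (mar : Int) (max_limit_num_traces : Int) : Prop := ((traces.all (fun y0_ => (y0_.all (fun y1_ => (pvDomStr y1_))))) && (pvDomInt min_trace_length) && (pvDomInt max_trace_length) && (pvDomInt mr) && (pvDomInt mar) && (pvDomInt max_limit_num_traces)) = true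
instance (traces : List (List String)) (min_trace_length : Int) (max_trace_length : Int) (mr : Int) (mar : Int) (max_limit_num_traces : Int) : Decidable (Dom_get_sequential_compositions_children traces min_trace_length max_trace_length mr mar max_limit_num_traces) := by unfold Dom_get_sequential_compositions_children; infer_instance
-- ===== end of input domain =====

-- B replaces A's per-candidate re-summation of the whole prefix by a running length carried with
-- each partial composition, and computes the suffix min/max remaining-length tables by one
-- structural recursion instead of A's two build-then-patch index loops. Return values only; no mutation.

-- ===== PORT A =====
-- 'while j >= 0: min_rem[j] = min_rem[j+1] + mlt[j+1]; j -= 1', recursion counter k = j + 1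
def pvAWhile (mlt : List Int) (acc : List Int) : Nat → List Int
  | 0 => acc
  | k+1 => pvAWhile mlt (acc.set k (acc.getD (k+1) 0 + mlt.getD (k+1) 0)) k

-- get_min_remaining_length: len(x[0]) per trace, zero list, two tail patches, downward while loop
def pvGetMinRem (traces : List (List String)) : List Int × List Int :=
  let mlt := traces.map (fun x => match x with | [] => (0:Int) | s :: _ => PySem.Str.len s)
  let n := traces.length
  let rem := ((traces.map (fun _ => (0:Int))).set (n-1) 0).set (n-2) (mlt.getD (n-1) 0)
  (mlt, pvAWhile mlt rem (n-2))

-- get_max_remaining_length: identical except len(x[-1]) per trace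
def pvGetMaxRem (traces : List (List String)) : List Int × List Int :=
  let mlt := traces.map (fun x => match x.getLast? with | none => (0:Int) | some s => PySem.Str.len s)
  let n := traces.length
  let rem := ((traces.map (fun _ => (0:Int))).set (n-1) 0).set (n-2) (mlt.getD (n-1) 0)
  (mlt, pvAWhile mlt rem (n-2))

-- inner z-loop over traces[i]: xy = x + [y]; val = sum(len(k) for k in xy); filtered append
def pvAInner (ti : List String) (mrl marl diff diff2 : Int) (x : List String) (acc : List (List String)) : List (List String) :=
  ti.foldl (fun acc2 y =>
    let xy := x ++ [y]
    let val := (xy.map PySem.Str.len).sum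
    if val + mrl ≤ diff ∧ diff2 ≤ val + marl then acc2 ++ [xy] else acc2) acc

-- outer while over i = 1 .. len(traces)-1; the j-loop over curr is the foldl
def pvAOuter (traces : List (List String)) (minRem maxRem : List Int) (diff diff2 : Int) (curr : List (List String)) (i : Nat) : List (List String) :=
  if i < traces.length then
    let mrl := minRem.getD i 0
    let marl := maxRem.getD i 0
    let tv := curr.foldl (fun acc x => pvAInner (traces.getD i []) mrl marl diff diff2 x acc) []
    pvAOuter traces minRem maxRem diff diff2 tv (i+1)
  else curr
termination_by traces.length - i

def get_sequential_compositions_children (traces : List (List String)) (min_trace_length : Int) (max_trace_length : Int) (mr : Int) (mar : Int) (max_limit_num_traces : Int) : List (List String) :=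
  let diff := max_trace_length - mr
  let diff2 := min_trace_length - mar
  let minRem := (pvGetMinRem traces).2
  let maxRem := (pvGetMaxRem traces).2
  -- curr = list(traces[0]); its elements are strings, and the 'if not type(x) is list: x = [x]'
  -- wrap in the first loop round turns exactly these into singletons — typed here up front
  let curr := (traces.headD []).map (fun s => [s])
  pvAOuter traces minRem maxRem diff diff2 curr 1

-- ===== PORT B =====
-- _suffix_bounds of Source B: one structural recursion building both suffix-sum tables
def pvSuffixBounds : List (List String) → List Int × List Int
  | [] => ([], [])
  | [_] => ([0], [0])
  | _ :: t :: rest =>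
    let lo := match t with | [] => (0:Int) | s :: _ => PySem.Str.len s
    let hi := match t.getLast? with | none => (0:Int) | some s => PySem.Str.len s
    let p := pvSuffixBounds (t :: rest)
    ((p.1.headD 0 + lo) :: p.1, (p.2.headD 0 + hi) :: p.2)

-- inner y-loop of Source B: val = lx + len(y) from the carried running length
def pvBInner (ti : List String) (mrl marl diff diff2 : Int) (p : List String × Int) (acc : List (List String × Int)) : List (List String × Int) :=
  ti.foldl (fun acc2 y =>
    let val := p.2 + PySem.Str.len y
    if val + mrl ≤ diff ∧ diff2 ≤ val + marl then acc2 ++ [(p.1 ++ [y], val)] else acc2) acc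

-- 'for i in range(1, len(traces))' of Source B, state = partials paired with their running length
def pvBOuter (traces : List (List String)) (minRem maxRem : List Int) (diff diff2 : Int) (curr : List (List String × Int)) (i : Nat) : List (List String × Int) :=
  if i < traces.length then
    let mrl := minRem.getD i 0
    let marl := maxRem.getD i 0
    let nxt := curr.foldl (fun acc p => pvBInner (traces.getD i []) mrl marl diff diff2 p acc) []
    pvBOuter traces minRem maxRem diff diff2 nxt (i+1)
  else curr
termination_by traces.length - i

def get_sequential_compositions_children_alt (traces : List (List String)) (min_trace_length : Int) (max_trace_length : Int) (mr : Int) (mar : Int) (max_limit_num_traces : Int) : List (List String) :=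
  let diff := max_trace_length - mr
  let diff2 := min_trace_length - mar
  let bounds := pvSuffixBounds traces
  let curr := (traces.headD []).map (fun s => ([s], PySem.Str.len s))
  (pvBOuter traces bounds.1 bounds.2 diff diff2 curr 1).map Prod.fst

-- ===== PRECONDITION & SPEC =====
-- Pre_ excludes exactly the inputs where A raises IndexError: fewer than two children
-- (traces[0] on [], and min_rem_length[-2] on a single child).
def Pre_get_sequential_compositions_children (traces : List (List String)) (min_trace_length : Int) (max_trace_length : Int) (mr : Int) (mar : Int) (max_limit_num_traces : Int) : Prop := 2 ≤ traces.length
instance (traces : List (List String)) (min_trace_length : Int) (max_trace_length : Int) (mr : Int) (mar : Int) (max_limit_num_traces : Int) : Decidable (Pre_get_sequential_compositions_children traces min_trace_length max_trace_length mr mar max_limit_num_traces) := by unfold Pre_get_sequential_compositions_children; infer_instance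

def pvWitness_get_sequential_compositions_children : List (List String) × Int × Int × Int × Int × Int := ([[ "a", "bb" ], [ "c" ]], 1, 5, 0, 0, 10)

def Spec_get_sequential_compositions_children (traces : List (List String)) (min_trace_length : Int) (max_trace_length : Int) (mr : Int) (mar : Int) (max_limit_num_traces : Int) (out : List (List String)) : Prop := out = get_sequential_compositions_children_alt traces min_trace_length max_trace_length mr mar max_limit_num_traces
instance (traces : List (List String)) (min_trace_length : Int) (max_trace_length : Int) (mr : Int) (mar : Int) (max_limit_num_traces : Int) (out : List (List String)) : Decidable (Spec_get_sequential_compositions_children traces min_trace_length max_trace_length mr mar max_limit_num_traces out) := by unfold Spec_get_sequential_compositions_children; infer_instance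

-- ===== CLAIM (what is proved, stated in full; the proofs are below) =====
def Claim_equal_get_sequential_compositions_children : Prop := ∀ (traces : List (List String)) (min_trace_length : Int) (max_trace_length : Int) (mr : Int) (mar : Int) (max_limit_num_traces : Int), Dom_get_sequential_compositions_children traces min_trace_length max_trace_length mr mar max_limit_num_traces → Pre_get_sequential_compositions_children traces min_trace_length max_trace_length mr mar max_limit_num_traces → Spec_get_sequential_compositions_children traces min_trace_length max_trace_length mr mar max_limit_num_traces (get_sequential_compositions_children traces min_trace_length max_trace_length mr mar max_limit_num_traces)

-- ===== LEMMAS AND PROOFS =====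

-- total length of a partial composition
def pvSumLen (x : List String) : Int := (x.map PySem.Str.len).sum

theorem pvSumLen_append (x : List String) (y : String) :
    pvSumLen (x ++ [y]) = pvSumLen x + PySem.Str.len y := by
  simp [pvSumLen]

-- dropping one more element removes getD k from the suffix sum
theorem pvSum_drop (l : List Int) (k : Nat) :
    (l.drop k).sum = l.getD k 0 + (l.drop (k+1)).sum := by
  by_cases h : k < l.length
  · rw [List.getD_eq_getElem l 0 h]
    conv_lhs => rw [List.drop_eq_getElem_cons h]
    rw [List.sum_cons]
  · have h1 : l.getD k 0 = 0 := List.getD_eq_default _ _ (by omega)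
    rw [h1, List.drop_eq_nil_of_le (by omega), List.drop_eq_nil_of_le (by omega)]
    simp

theorem pvAWhile_length (mlt acc : List Int) (k : Nat) :
    (pvAWhile mlt acc k).length = acc.length := by
  induction k generalizing acc with
  | zero => rfl
  | succ k ih => rw [pvAWhile]; rw [ih]; simp

theorem pvAWhile_getD (mlt : List Int) (acc : List Int) (k : Nat)
    (hlen : acc.length = mlt.length)
    (h : ∀ j, k ≤ j → acc.getD j 0 = (mlt.drop (j+1)).sum) :
    ∀ j, (pvAWhile mlt acc k).getD j 0 = (mlt.drop (j+1)).sum := by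
  induction k generalizing acc with
  | zero => exact fun j => h j (Nat.zero_le j)
  | succ k ih =>
    rw [pvAWhile]
    apply ih
    · simp [hlen]
    · intro j hj
      by_cases hk : j = k
      · subst hk
        by_cases hin : j < acc.length
        · rw [List.getD_eq_getElem _ 0 (by simpa using hin), List.getElem_set_self]
          rw [h (j+1) (by omega)]
          rw [pvSum_drop mlt (j+1)]
          ring
        · push_neg at hin
          rw [List.getD_eq_default _ _ (by simpa using hin)]
          rw [pvSum_drop mlt (j+1)]
          have h1 : mlt.getD (j+1) 0 = 0 := List.getD_eq_default _ _ (by omega)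
          have h2 : (mlt.drop (j+1+1)).sum = 0 := by
            rw [List.drop_eq_nil_of_le (by omega)]; rfl
          rw [h1, h2]; simp
      · have : acc.getD j 0 = (mlt.drop (j+1)).sum := h j (by omega)
        rw [← this]
        by_cases hin : j < acc.length
        · rw [List.getD_eq_getElem _ 0 (by simpa using hin),
              List.getD_eq_getElem _ 0 hin, List.getElem_set_ne (by omega)]
        · push_neg at hin
          rw [List.getD_eq_default _ _ (by simpa using hin), List.getD_eq_default _ _ (by omega)]

-- the per-trace min/max element lengths Source B's recursion consumes
def pvLo (x : List String) : Int := match x with | [] => 0 | s :: _ => PySem.Str.len s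
def pvHi (x : List String) : Int := match x.getLast? with | none => 0 | some s => PySem.Str.len s

theorem pvSuffixBounds_length (ts : List (List String)) :
    (pvSuffixBounds ts).1.length = ts.length ∧ (pvSuffixBounds ts).2.length = ts.length := by
  induction ts with
  | nil => simp [pvSuffixBounds]
  | cons a rest ih =>
    cases rest with
    | nil => simp [pvSuffixBounds]
    | cons t r => simp [pvSuffixBounds]; exact ⟨by simpa using ih.1, by simpa using ih.2⟩

theorem pvSuffixBounds_headD (ts : List (List String)) (h : ts ≠ []) :
    (pvSuffixBounds ts).1.headD 0 = ((ts.drop 1).map pvLo).sum ∧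
    (pvSuffixBounds ts).2.headD 0 = ((ts.drop 1).map pvHi).sum := by
  induction ts with
  | nil => simp at h
  | cons a rest ih =>
    cases rest with
    | nil => simp [pvSuffixBounds]
    | cons t r =>
      have := ih (by simp)
      simp [pvSuffixBounds, pvLo, pvHi] at this ⊢
      constructor
      · rw [this.1]; ring
      · rw [this.2]; ring

theorem pvSuffixBounds_getD (ts : List (List String)) (j : Nat) :
    (pvSuffixBounds ts).1.getD j 0 = ((ts.map pvLo).drop (j+1)).sum ∧
    (pvSuffixBounds ts).2.getD j 0 = ((ts.map pvHi).drop (j+1)).sum := by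
  induction ts generalizing j with
  | nil => simp [pvSuffixBounds]
  | cons a rest ih =>
    cases rest with
    | nil =>
      cases j with
      | zero => simp [pvSuffixBounds]
      | succ j => simp [pvSuffixBounds]
    | cons t r =>
      cases j with
      | zero =>
        have hh := pvSuffixBounds_headD (t :: r) (by simp)
        simp [pvSuffixBounds, pvLo, pvHi] at hh ⊢
        constructor
        · rw [hh.1]; ring
        · rw [hh.2]; ring
      | succ j =>
        simp only [pvSuffixBounds, List.getD_cons_succ]
        have := ih j
        simpa using this

-- spec of A's downward while loop starting from the patched zero array
theorem pvAWhile_spec (mlt : List Int) (n : Nat) (hn : mlt.length = n) (h2 : 2 ≤ n) :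
    ∀ j, (pvAWhile mlt (((List.replicate n (0:Int)).set (n-1) 0).set (n-2)
      (mlt.getD (n-1) 0)) (n-2)).getD j 0 = (mlt.drop (j+1)).sum := by
  apply pvAWhile_getD
  · simp [hn]
  · intro j hj
    by_cases hj2 : j = n-2
    · subst hj2
      rw [List.getD_eq_getElem _ 0 (by simp; omega), List.getElem_set_self]
      rw [pvSum_drop mlt (n-2+1)]
      have : n-2+1 = n-1 := by omega
      rw [this, List.drop_eq_nil_of_le (by omega)]
      simp
    · by_cases hj1 : j = n-1
      · subst hj1
        rw [List.getD_eq_getElem _ 0 (by simp; omega),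
            List.getElem_set_ne (by omega), List.getElem_set_self]
        rw [List.drop_eq_nil_of_le (by omega)]; rfl
      · rw [List.getD_eq_default _ _ (by simp; omega),
            List.drop_eq_nil_of_le (by omega)]; rfl

-- A's patched-array construction equals Source B's suffix recursion (given at least two children)
theorem pvMinRem_eq (traces : List (List String)) (h2 : 2 ≤ traces.length) :
    (pvGetMinRem traces).2 = (pvSuffixBounds traces).1 := by
  have hconst : traces.map (fun _ => (0:Int)) = List.replicate traces.length 0 := by
    simp [List.map_const']
  have hA : (pvGetMinRem traces).2 = pvAWhile (traces.map pvLo)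
      (((List.replicate traces.length (0:Int)).set (traces.length-1) 0).set (traces.length-2)
        ((traces.map pvLo).getD (traces.length-1) 0)) (traces.length-2) := by
    simp only [pvGetMinRem, hconst]; rfl
  rw [hA]
  apply List.ext_getElem
  · rw [pvAWhile_length]
    simp [(pvSuffixBounds_length traces).1]
  · intro j hja hjb
    have hga := pvAWhile_spec (traces.map pvLo) traces.length (by simp) h2 j
    have hgb := (pvSuffixBounds_getD traces j).1
    rw [List.getD_eq_getElem _ 0 hja] at hga
    rw [List.getD_eq_getElem _ 0 hjb] at hgb
    rw [hga, hgb]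

theorem pvMaxRem_eq (traces : List (List String)) (h2 : 2 ≤ traces.length) :
    (pvGetMaxRem traces).2 = (pvSuffixBounds traces).2 := by
  have hconst : traces.map (fun _ => (0:Int)) = List.replicate traces.length 0 := by
    simp [List.map_const']
  have hA : (pvGetMaxRem traces).2 = pvAWhile (traces.map pvHi)
      (((List.replicate traces.length (0:Int)).set (traces.length-1) 0).set (traces.length-2)
        ((traces.map pvHi).getD (traces.length-1) 0)) (traces.length-2) := by
    simp only [pvGetMaxRem, hconst]; rfl
  rw [hA]
  apply List.ext_getElem
  · rw [pvAWhile_length]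
    simp [(pvSuffixBounds_length traces).2]
  · intro j hja hjb
    have hga := pvAWhile_spec (traces.map pvHi) traces.length (by simp) h2 j
    have hgb := (pvSuffixBounds_getD traces j).2
    rw [List.getD_eq_getElem _ 0 hja] at hga
    rw [List.getD_eq_getElem _ 0 hjb] at hgb
    rw [hga, hgb]

-- the running length carried by B is the total length of the partial
def pvInv (curr : List (List String × Int)) : Prop := ∀ p ∈ curr, p.2 = pvSumLen p.1

theorem pvBInner_fst (ti : List String) (mrl marl diff diff2 : Int)
    (p : List String × Int) (accA : List (List String)) (accB : List (List String × Int))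
    (hp : p.2 = pvSumLen p.1) (hacc : accA = accB.map Prod.fst) :
    pvAInner ti mrl marl diff diff2 p.1 accA
      = (pvBInner ti mrl marl diff diff2 p accB).map Prod.fst := by
  induction ti generalizing accA accB with
  | nil => simpa [pvAInner, pvBInner]
  | cons y r ih =>
    simp only [pvAInner, pvBInner, List.foldl_cons] at ih ⊢
    have hv : ((p.1 ++ [y]).map PySem.Str.len).sum = p.2 + PySem.Str.len y := by
      rw [hp]; exact pvSumLen_append p.1 y
    rw [hv]
    by_cases hc : p.2 + PySem.Str.len y + mrl ≤ diff ∧ diff2 ≤ p.2 + PySem.Str.len y + marl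
    · rw [if_pos hc, if_pos hc]
      exact ih _ _ (by simp [hacc])
    · rw [if_neg hc, if_neg hc]
      exact ih _ _ hacc

theorem pvBInner_inv (ti : List String) (mrl marl diff diff2 : Int)
    (p : List String × Int) (acc : List (List String × Int))
    (hp : p.2 = pvSumLen p.1) (hacc : pvInv acc) :
    pvInv (pvBInner ti mrl marl diff diff2 p acc) := by
  induction ti generalizing acc with
  | nil => simpa [pvBInner]
  | cons y r ih =>
    simp only [pvBInner, List.foldl_cons] at ih ⊢
    split
    · apply ih
      intro q hq
      rcases List.mem_append.1 hq with hq | hq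
      · exact hacc q hq
      · simp at hq
        subst hq
        simp [pvSumLen_append, hp]
    · exact ih _ hacc

theorem pvRound_fst (ti : List String) (mrl marl diff diff2 : Int)
    (curr : List (List String × Int)) :
    ∀ (accA : List (List String)) (accB : List (List String × Int)),
      pvInv curr → accA = accB.map Prod.fst →
      (curr.map Prod.fst).foldl (fun acc x => pvAInner ti mrl marl diff diff2 x acc) accA
        = (curr.foldl (fun acc p => pvBInner ti mrl marl diff diff2 p acc) accB).map Prod.fst := by
  induction curr with
  | nil => intro accA accB _ hacc; simpa
  | cons p r ih =>
    intro accA accB hinv hacc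
    simp only [List.map_cons, List.foldl_cons]
    exact ih _ _ (fun q hq => hinv q (List.mem_cons_of_mem p hq))
      (pvBInner_fst ti mrl marl diff diff2 p accA accB (hinv p (List.mem_cons_self ..)) hacc)

theorem pvRound_inv (ti : List String) (mrl marl diff diff2 : Int)
    (curr : List (List String × Int)) :
    ∀ (accB : List (List String × Int)), pvInv curr → pvInv accB →
      pvInv (curr.foldl (fun acc p => pvBInner ti mrl marl diff diff2 p acc) accB) := by
  induction curr with
  | nil => intro accB _ haccB; simpa
  | cons p r ih =>
    intro accB hinv haccB
    simp only [List.foldl_cons]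
    exact ih _ (fun q hq => hinv q (List.mem_cons_of_mem p hq))
      (pvBInner_inv ti mrl marl diff diff2 p accB (hinv p (List.mem_cons_self ..)) haccB)

theorem pvOuter_fst (traces : List (List String)) (mn mx : List Int) (diff diff2 : Int)
    (i : Nat) (curr : List (List String × Int)) (hinv : pvInv curr) :
    pvAOuter traces mn mx diff diff2 (curr.map Prod.fst) i
      = (pvBOuter traces mn mx diff diff2 curr i).map Prod.fst := by
  rw [pvAOuter, pvBOuter]
  by_cases h : i < traces.length
  · rw [if_pos h, if_pos h]
    dsimp only
    rw [pvRound_fst _ _ _ _ _ curr [] [] hinv rfl]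
    exact pvOuter_fst traces mn mx diff diff2 (i+1) _
      (pvRound_inv _ _ _ _ _ curr [] hinv (by intro q hq; simp at hq))
  · rw [if_neg h, if_neg h]
termination_by traces.length - i

-- ===== VERDICT (by name: the statement is the Claim_ definition above) =====
theorem get_sequential_compositions_children_spec : Claim_equal_get_sequential_compositions_children := by
  intro traces mtl xtl mr mar mlnt _hdom hpre
  unfold Spec_get_sequential_compositions_children
  unfold Pre_get_sequential_compositions_children at hpre
  unfold get_sequential_compositions_children get_sequential_compositions_children_alt
  dsimp only
  rw [pvMinRem_eq traces hpre, pvMaxRem_eq traces hpre]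
  have hmap : (traces.headD []).map (fun s => [s])
      = ((traces.headD []).map (fun s => ([s], PySem.Str.len s))).map Prod.fst := by
    simp
  rw [hmap]
  apply pvOuter_fst
  intro p hp
  simp at hp
  obtain ⟨s, _, rfl⟩ := hp
  simp [pvSumLen]
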